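-- pv_equiv track=rewrite | github.com/BARarch/My-Hackerranks | getaways/EmmasComputerPluses181021.py | left_mask
-- ===== SOURCE A (Python) =====
-- def left_mask(r, c, n):
--     ## r rows of c - n 1s followed buy n 0s
--     if n >= c:
--         return 0
--     val = 0
--     num = ((2 ** (c - n)) - 1) << n
--     for _ in range(r):
--         val <<= c
--         val |= num
--     return val
-- ===== SOURCE B (Python) =====
-- def left_mask(r, c, n):
--     # r rows of (c - n) 1s then n 0s, assembled by doubling concatenation
--     if n >= c:
--         return 0
--     num = ((1 << (c - n)) - 1) << n
--     def rep(k):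
--         if k <= 0:
--             return 0
--         m = k // 2
--         h = rep(m)
--         v = (h << (c * m)) | h
--         if k % 2:
--             v = (v << c) | num
--         return v
--     return rep(r)
-- ===== Notes on version B (the rewrite author's own statement) =====
-- stated objective: alternative
-- what changed: Replaced A's linear r-step shift/OR accumulation loop by recursive doubling concatenation: the block for k rows is built from the block for k//2 rows (shift-OR it with itself, plus one extra row when k is odd), O(log r) big-int operations instead of O(r).
import Mathlib
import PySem

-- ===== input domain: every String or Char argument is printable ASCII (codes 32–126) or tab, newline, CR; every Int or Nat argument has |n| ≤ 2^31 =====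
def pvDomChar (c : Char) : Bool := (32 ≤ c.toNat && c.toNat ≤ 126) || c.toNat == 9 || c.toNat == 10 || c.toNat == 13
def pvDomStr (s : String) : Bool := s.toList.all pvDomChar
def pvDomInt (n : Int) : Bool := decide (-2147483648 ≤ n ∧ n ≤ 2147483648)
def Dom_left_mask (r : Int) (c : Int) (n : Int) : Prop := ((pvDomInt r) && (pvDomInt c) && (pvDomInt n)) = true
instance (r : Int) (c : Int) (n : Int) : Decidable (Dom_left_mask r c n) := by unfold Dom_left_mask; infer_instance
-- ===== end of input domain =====

-- B builds the r-row bit block by recursive doubling concatenation (O(log r) big-int ops) instead of A's r-step shift/OR loop (objective: alternative).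


-- ===== PORT A =====
-- Literal port of A: '2 ** (c - n)' and the shifts use .toNat exponents, exact on Pre_
-- (inside Pre_ with n < c we have 0 ≤ n < c, where Python's shifts are defined).
def left_mask (r : Int) (c : Int) (n : Int) : Int :=
  if n ≥ c then 0
  else
    let num : Int := ((2 : Int) ^ (c - n).toNat - 1) <<< n.toNat
    (List.range r.toNat).foldl (fun val _ => PySem.Int.bor (val <<< c.toNat) num) 0

-- ===== PORT B =====
-- rep(k) of Source B, on the row count as a Nat (Python's 'k <= 0' base case becomes k = 0;
-- in the reachable branch 0 ≤ n < c so c*m and c are valid nonnegative shift amounts).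
def pvRep (C : Nat) (num : Int) : Nat → Int
  | 0 => 0
  | (k+1) =>
    let m := (k+1) / 2
    let h := pvRep C num m
    let v := PySem.Int.bor (h <<< (C * m)) h
    if (k+1) % 2 = 1 then PySem.Int.bor (v <<< C) num else v
  decreasing_by exact Nat.div_lt_self (Nat.succ_pos k) (by norm_num)

def left_mask_alt (r : Int) (c : Int) (n : Int) : Int :=
  if n ≥ c then 0
  else
    let num : Int := ((1 : Int) <<< (c - n).toNat - 1) <<< n.toNat
    pvRep c.toNat num r.toNat

-- ===== PRECONDITION & SPEC =====
-- Pre_ excludes exactly the inputs where Python A raises (ValueError: negative shift count,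
-- reached iff n < c and n < 0); A returns normally everywhere else.
def Pre_left_mask (r : Int) (c : Int) (n : Int) : Prop := 0 ≤ n ∨ c ≤ n
instance (r : Int) (c : Int) (n : Int) : Decidable (Pre_left_mask r c n) := by unfold Pre_left_mask; infer_instance
def pvWitness_left_mask : Int × Int × Int := (3, 4, 1)

def Spec_left_mask (r : Int) (c : Int) (n : Int) (out : Int) : Prop := out = left_mask_alt r c n
instance (r : Int) (c : Int) (n : Int) (out : Int) : Decidable (Spec_left_mask r c n out) := by unfold Spec_left_mask; infer_instance

-- ===== CLAIM (what is proved, stated in full; the proofs are below) =====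
def Claim_equal_left_mask : Prop := ∀ (r : Int) (c : Int) (n : Int), Dom_left_mask r c n → Pre_left_mask r c n → Spec_left_mask r c n (left_mask r c n)

-- ===== LEMMAS AND PROOFS =====

theorem int_shl (a : Int) (k : ℕ) : a <<< k = a * 2 ^ k := by
  rw [Int.shiftLeft_eq']; push_cast; ring

-- OR of disjoint bit ranges is addition (Nat).
theorem lor_mul_pow_eq_add (m : ℕ) : ∀ a b : ℕ, b < 2 ^ m → (a * 2 ^ m) ||| b = a * 2 ^ m + b := by
  induction m with
  | zero =>
    intro a b hb
    interval_cases b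
    simp
  | succ m ih =>
    intro a b hb
    have hb2 : b / 2 < 2 ^ m := by omega
    have h1 : a * 2 ^ (m + 1) = Nat.bit false (a * 2 ^ m) := by
      simp [Nat.bit]; ring
    have h2 : b = Nat.bit (b % 2 = 1) (b / 2) := by
      rcases Nat.mod_two_eq_zero_or_one b with h | h <;> simp [Nat.bit, h] <;> omega
    rw [h1, h2, Nat.lor_bit, ih _ _ hb2]
    rcases Nat.mod_two_eq_zero_or_one b with h | h <;> simp [Nat.bit, h] <;> ring

-- geometric sum S k = ∑_{i<k} (2^C)^i, defined by the bottom-row recurrence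
def pvS (C : ℕ) : ℕ → ℕ
  | 0 => 0
  | (k+1) => pvS C k * 2 ^ C + 1

theorem pvS_add (C a b : ℕ) : pvS C (a + b) = pvS C a * 2 ^ (C * b) + pvS C b := by
  induction b with
  | zero => simp [pvS]
  | succ b ih =>
    rw [← Nat.add_assoc, pvS, ih, pvS, Nat.mul_succ, pow_add]
    ring

theorem pvS_lt (C num k : ℕ) (hnum : num < 2 ^ C) : num * pvS C k < 2 ^ (C * k) := by
  induction k with
  | zero => simp [pvS]
  | succ k ih =>
    have h1 : 2 ^ (C * (k + 1)) = 2 ^ (C * k) * 2 ^ C := by rw [Nat.mul_succ, pow_add]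
    have h2 : 0 < 2 ^ C := Nat.two_pow_pos C
    have h3 : num * pvS C (k + 1) = (num * pvS C k) * 2 ^ C + num := by rw [pvS]; ring
    nlinarith

-- the doubling recursion computes num times the geometric sum
theorem pvRep_eq (C num : ℕ) (hnum : num < 2 ^ C) :
    ∀ k, pvRep C (num : Int) k = ((num * pvS C k : ℕ) : Int) := by
  intro k
  induction k using Nat.strong_induction_on with
  | _ k ih =>
    match k with
    | 0 => simp [pvRep, pvS]
    | (k+1) =>
      rw [pvRep]
      have hm : (k+1) / 2 < k + 1 := Nat.div_lt_self (Nat.succ_pos k) (by norm_num)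
      set m := (k+1) / 2 with hmdef
      rw [ih m hm]
      have hbound : num * pvS C m < 2 ^ (C * m) := pvS_lt C num m hnum
      have hinner : PySem.Int.bor (((num * pvS C m : ℕ) : Int) <<< (C * m)) ((num * pvS C m : ℕ) : Int)
          = ((num * pvS C (m + m) : ℕ) : Int) := by
        have hsh : (((num * pvS C m : ℕ) : Int)) <<< (C * m)
            = (((num * pvS C m) * 2 ^ (C * m) : ℕ) : Int) := by
          rw [int_shl]; push_cast; ring
        rw [hsh, PySem.Int.bor_natCast, lor_mul_pow_eq_add (C * m) _ _ hbound, pvS_add C m m]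
        congr 1
        ring
      rw [hinner]
      by_cases hodd : (k+1) % 2 = 1
      · rw [if_pos hodd]
        have hk : k + 1 = (m + m) + 1 := by omega
        have hsh : (((num * pvS C (m + m) : ℕ) : Int)) <<< C
            = (((num * pvS C (m + m)) * 2 ^ C : ℕ) : Int) := by
          rw [int_shl]; push_cast; ring
        rw [hsh, PySem.Int.bor_natCast, lor_mul_pow_eq_add C _ _ hnum, hk, pvS]
        congr 1
        ring
      · rw [if_neg hodd]
        have hk : k + 1 = m + m := by omega
        rw [hk]

-- A's loop computes num times the geometric sum as well.
theorem foldA_eq (C num : ℕ) (hnum : num < 2 ^ C) (k : ℕ) :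
    (List.range k).foldl (fun val _ => PySem.Int.bor (val <<< C) (num : Int)) 0
      = ((num * pvS C k : ℕ) : Int) := by
  induction k with
  | zero => simp [pvS]
  | succ k ih =>
    rw [List.range_succ, List.foldl_append, ih]
    simp only [List.foldl_cons, List.foldl_nil]
    have hsh : ((num * pvS C k : ℕ) : Int) <<< C
        = (((num * pvS C k) * 2 ^ C : ℕ) : Int) := by
      rw [int_shl]; push_cast; ring
    rw [hsh, PySem.Int.bor_natCast, lor_mul_pow_eq_add C _ num hnum, pvS]
    congr 1
    ring

theorem left_mask_main (r c n : Int) (hn : 0 ≤ n) (hnc : n < c) :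
    left_mask r c n = left_mask_alt r c n := by
  unfold left_mask left_mask_alt
  rw [if_neg (by omega), if_neg (by omega)]
  set C : ℕ := c.toNat with hC
  set N : ℕ := n.toNat with hN
  have hNC : N < C := by omega
  have hcnN : (c - n).toNat = C - N := by omega
  have hnumlt : (2 ^ (C - N) - 1) * 2 ^ N < 2 ^ C := by
    have h2 : 2 ^ (C - N) * 2 ^ N = 2 ^ C := by rw [← pow_add]; congr 1; omega
    have h3 : 0 < 2 ^ N := Nat.two_pow_pos N
    have h4 : (2 ^ (C - N) - 1) * 2 ^ N = 2 ^ C - 2 ^ N := by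
      rw [Nat.sub_mul, one_mul, h2]
    have h5 : 0 < 2 ^ C := Nat.two_pow_pos C
    omega
  have hnum : (((2 : Int) ^ (c - n).toNat - 1) <<< n.toNat)
      = (((2 ^ (C - N) - 1) * 2 ^ N : ℕ) : Int) := by
    rw [hcnN, int_shl]
    push_cast [Nat.one_le_two_pow]
    ring
  have hnum' : (((1 : Int) <<< (c - n).toNat - 1) <<< n.toNat)
      = (((2 ^ (C - N) - 1) * 2 ^ N : ℕ) : Int) := by
    rw [← hnum, int_shl, int_shl, int_shl]
    norm_num
  rw [hnum, hnum', foldA_eq C _ hnumlt, pvRep_eq C _ hnumlt]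

-- ===== VERDICT (by name: the statement is the Claim_ definition above) =====
theorem left_mask_spec : Claim_equal_left_mask := by
  intro r c n _ hpre
  unfold Spec_left_mask
  by_cases h : n ≥ c
  · unfold left_mask left_mask_alt
    rw [if_pos h, if_pos h]
  · push Not at h
    rcases hpre with hn | hcn
    · exact left_mask_main r c n hn h
    · omega
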